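-- pv_equiv track=rewrite | github.com/ricscar2570/aws-friendly-counsellor | backend/services/guide_generator.py | get_troubleshooting_guide
-- ===== SOURCE A (Python) =====
-- from typing import Dict, List, Any
--
-- def get_troubleshooting_guide(services: List[str]) -> Dict[str, str]:
--     """Troubleshooting tips for services"""
--
--     guide = {
--         "general": "Check CloudWatch Logs first. Enable X-Ray for tracing."
--     }
--
--     if any("lambda" in s.lower() for s in services):
--         guide["lambda_timeout"] = "Increase timeout or optimize code"
--         guide["lambda_errors"] = "Check CloudWatch Logs for stack traces"
--
--     if any("dynamodb" in s.lower() for s in services):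
--         guide["dynamodb_throttling"] = "Increase capacity or enable auto-scaling"
--
--     if any("apigateway" in s.lower() for s in services):
--         guide["api_502"] = "Check Lambda integration and permissions"
--
--     return guide
-- ===== SOURCE B (Python) =====
-- def get_troubleshooting_guide(services):
--     """Troubleshooting tips for services"""
--     has_lambda = has_dynamo = has_api = False
--     for s in services:
--         if has_lambda and has_dynamo and has_api:
--             break
--         low = s.lower()
--         has_lambda = has_lambda or "lambda" in low
--         has_dynamo = has_dynamo or "dynamodb" in low
--         has_api = has_api or "apigateway" in low
--     guide = {"general": "Check CloudWatch Logs first. Enable X-Ray for tracing."}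
--     if has_lambda:
--         guide["lambda_timeout"] = "Increase timeout or optimize code"
--         guide["lambda_errors"] = "Check CloudWatch Logs for stack traces"
--     if has_dynamo:
--         guide["dynamodb_throttling"] = "Increase capacity or enable auto-scaling"
--     if has_api:
--         guide["api_502"] = "Check Lambda integration and permissions"
--     return guide
-- ===== Notes on version B (the rewrite author's own statement) =====
-- stated objective: faster
-- what changed: Replaces the three separate any() scans over services with one pass that lowercases each element once, maintains three boolean flags and breaks early once all are set, then builds the dict from the flags.
import Mathlib
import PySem

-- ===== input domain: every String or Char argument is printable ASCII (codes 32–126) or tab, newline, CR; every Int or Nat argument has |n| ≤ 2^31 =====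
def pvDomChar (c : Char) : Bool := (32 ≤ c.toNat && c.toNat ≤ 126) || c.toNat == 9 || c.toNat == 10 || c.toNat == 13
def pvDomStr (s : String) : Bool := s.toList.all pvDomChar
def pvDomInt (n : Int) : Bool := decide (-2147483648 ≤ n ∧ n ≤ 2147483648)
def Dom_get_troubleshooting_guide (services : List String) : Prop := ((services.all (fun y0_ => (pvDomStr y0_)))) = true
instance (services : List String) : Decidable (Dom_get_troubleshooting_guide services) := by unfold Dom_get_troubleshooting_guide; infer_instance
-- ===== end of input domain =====

-- B replaces A's three separate any() scans with one pass over services that lowercases each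
-- element once, keeps three boolean flags with an early break, then builds the dict from the flags.


-- ===== PORT A =====
def get_troubleshooting_guide (services : List String) : List (String × String) :=
  let guide : PySem.Dict String String :=
    PySem.Dict.ofList [("general", "Check CloudWatch Logs first. Enable X-Ray for tracing.")]
  let guide :=
    if services.any (fun s => PySem.Str.isIn "lambda" (PySem.Str.lower s)) then
      PySem.Dict.insert
        (PySem.Dict.insert guide "lambda_timeout" "Increase timeout or optimize code")
        "lambda_errors" "Check CloudWatch Logs for stack traces"
    else guide
  let guide :=
    if services.any (fun s => PySem.Str.isIn "dynamodb" (PySem.Str.lower s)) then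
      PySem.Dict.insert guide "dynamodb_throttling" "Increase capacity or enable auto-scaling"
    else guide
  let guide :=
    if services.any (fun s => PySem.Str.isIn "apigateway" (PySem.Str.lower s)) then
      PySem.Dict.insert guide "api_502" "Check Lambda integration and permissions"
    else guide
  guide.items

-- ===== PORT B =====
-- single pass with early break, as in Source B
def pvScanFlags : List String → Bool → Bool → Bool → Bool × Bool × Bool
  | [], l, d, a => (l, d, a)
  | s :: rest, l, d, a =>
    if l && d && a then (l, d, a)
    else
      let low := PySem.Str.lower s
      pvScanFlags rest (l || PySem.Str.isIn "lambda" low)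
                       (d || PySem.Str.isIn "dynamodb" low)
                       (a || PySem.Str.isIn "apigateway" low)

def get_troubleshooting_guide_alt (services : List String) : List (String × String) :=
  let (hasLambda, hasDynamo, hasApi) := pvScanFlags services false false false
  [("general", "Check CloudWatch Logs first. Enable X-Ray for tracing.")]
  ++ (if hasLambda then
        [("lambda_timeout", "Increase timeout or optimize code"),
         ("lambda_errors", "Check CloudWatch Logs for stack traces")] else [])
  ++ (if hasDynamo then
        [("dynamodb_throttling", "Increase capacity or enable auto-scaling")] else [])
  ++ (if hasApi then
        [("api_502", "Check Lambda integration and permissions")] else [])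

-- ===== PRECONDITION & SPEC =====
def Spec_get_troubleshooting_guide (services : List String) (out : List (String × String)) : Prop := out = get_troubleshooting_guide_alt services
instance (services : List String) (out : List (String × String)) : Decidable (Spec_get_troubleshooting_guide services out) := by unfold Spec_get_troubleshooting_guide; infer_instance

-- ===== CLAIM (what is proved, stated in full; the proofs are below) =====
def Claim_equal_get_troubleshooting_guide : Prop := ∀ (services : List String), Dom_get_troubleshooting_guide services → Spec_get_troubleshooting_guide services (get_troubleshooting_guide services)

-- ===== LEMMAS AND PROOFS =====
theorem pvScanFlags_eq (ss : List String) (l d a : Bool) :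
    pvScanFlags ss l d a =
      (l || ss.any (fun s => PySem.Str.isIn "lambda" (PySem.Str.lower s)),
       d || ss.any (fun s => PySem.Str.isIn "dynamodb" (PySem.Str.lower s)),
       a || ss.any (fun s => PySem.Str.isIn "apigateway" (PySem.Str.lower s))) := by
  induction ss generalizing l d a with
  | nil => simp [pvScanFlags]
  | cons s rest ih =>
    by_cases h : (l && d && a) = true
    · obtain ⟨⟨hl, hd⟩, ha⟩ := by simpa [Bool.and_eq_true] using h
      simp [pvScanFlags, hl, hd, ha]
    · simp only [pvScanFlags, h, Bool.false_eq_true, if_false, ih]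
      simp [Bool.or_assoc]

-- ===== VERDICT (by name: the statement is the Claim_ definition above) =====
theorem get_troubleshooting_guide_spec : Claim_equal_get_troubleshooting_guide := by
  intro services _
  unfold Spec_get_troubleshooting_guide get_troubleshooting_guide get_troubleshooting_guide_alt
  rw [pvScanFlags_eq]
  simp only [Bool.false_or]
  by_cases hl : services.any (fun s => PySem.Str.isIn "lambda" (PySem.Str.lower s)) = true <;>
  by_cases hd : services.any (fun s => PySem.Str.isIn "dynamodb" (PySem.Str.lower s)) = true <;>
  by_cases ha : services.any (fun s => PySem.Str.isIn "apigateway" (PySem.Str.lower s)) = true <;>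
  simp only [hl, hd, ha, if_true, Bool.false_eq_true, if_false] <;> rfl
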